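-- pv_equiv track=rewrite | github.com/starz365/xarastore-platform-project | services/ai/python/fraud-detection.py | _detect_phone_carrier
-- ===== SOURCE A (Python) =====
-- from typing import Dict, List, Any, Optional, Tuple
--
-- def _detect_phone_carrier(phone: str) -> Optional[str]:
--     """Detect phone carrier from phone number"""
--     if not phone:
--         return None
--
--     # Kenyan carrier prefixes
--     carriers = {
--         'safaricom': ['0701', '0702', '0703', '0704', '0710', '0711', '0712', '0713', '0714', '0715', '0716', '0717', '0718', '0719', '0720', '0721', '0722', '0723', '0724', '0725', '0726', '0727', '0728', '0729', '0790', '0791', '0792', '0793', '0794', '0795', '0796', '0797', '0798', '0799'],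
--         'airtel': ['0730', '0731', '0732', '0733', '0734', '0735', '0736', '0737', '0738', '0739', '0750', '0751', '0752', '0753', '0754', '0755', '0756', '0757', '0758', '0759', '0740', '0741', '0742', '0743', '0744', '0745', '0746', '0747'],
--         'telkom': ['0760', '0761', '0762', '0763', '0764', '0765', '0766', '0767', '0768', '0769', '0770', '0771', '0772', '0773', '0774', '0775', '0776', '0777', '0778', '0779'],
--         'equitel': ['0748', '0749']
--     }
--
--     # Extract last 10 digits (remove country code)
--     digits = ''.join(filter(str.isdigit, phone))
--     if len(digits) >= 10:
--         prefix = digits[-10:-6]  # First 4 digits of local number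
--         for carrier, prefixes in carriers.items():
--             if prefix in prefixes:
--                 return carrier
--
--     return 'unknown'
-- ===== SOURCE B (Python) =====
-- def _detect_phone_carrier(phone: str):
--     """Detect phone carrier from phone number (arithmetic range classification)."""
--     if not phone:
--         return None
--     digits = ''.join(filter(str.isdigit, phone))
--     if len(digits) < 10:
--         return 'unknown'
--     a, b, c, d = digits[-10:-6]
--     if a != '0' or b != '7':
--         return 'unknown'
--     n = (ord(c) - 48) * 10 + (ord(d) - 48)
--     if 1 <= n <= 4 or 10 <= n <= 29 or 90 <= n <= 99:
--         return 'safaricom'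
--     if 30 <= n <= 47 or 50 <= n <= 59:
--         return 'airtel'
--     if 48 <= n <= 49:
--         return 'equitel'
--     if 60 <= n <= 79:
--         return 'telkom'
--     return 'unknown'
-- ===== Notes on version B (the rewrite author's own statement) =====
-- stated objective: alternative
-- what changed: Replaces the nested carrier/prefix-list membership loop by decoding the two variable prefix digits into a number and classifying it with closed interval comparisons (no prefix table at all).
import Mathlib
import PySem

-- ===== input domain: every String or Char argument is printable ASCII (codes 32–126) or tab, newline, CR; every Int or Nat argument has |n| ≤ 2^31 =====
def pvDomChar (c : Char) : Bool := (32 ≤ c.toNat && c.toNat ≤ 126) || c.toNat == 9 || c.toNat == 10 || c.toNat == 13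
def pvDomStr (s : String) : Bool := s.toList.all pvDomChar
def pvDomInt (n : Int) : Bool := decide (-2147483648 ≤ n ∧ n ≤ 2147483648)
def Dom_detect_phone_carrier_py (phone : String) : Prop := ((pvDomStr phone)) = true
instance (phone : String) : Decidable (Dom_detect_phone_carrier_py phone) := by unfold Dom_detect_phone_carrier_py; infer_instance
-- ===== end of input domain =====

-- B replaces A's grouped prefix-list membership loop by interval arithmetic on the two variable prefix digits (objective: alternative, same cost class on these fixed tables).

-- ===== PORT A =====
-- the carriers dict, in insertion order (values as List Char prefixes)
def pvCarriers : List (String × List (List Char)) :=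
  [("safaricom", ["0701".toList, "0702".toList, "0703".toList, "0704".toList, "0710".toList, "0711".toList, "0712".toList, "0713".toList, "0714".toList, "0715".toList, "0716".toList, "0717".toList, "0718".toList, "0719".toList, "0720".toList, "0721".toList, "0722".toList, "0723".toList, "0724".toList, "0725".toList, "0726".toList, "0727".toList, "0728".toList, "0729".toList, "0790".toList, "0791".toList, "0792".toList, "0793".toList, "0794".toList, "0795".toList, "0796".toList, "0797".toList, "0798".toList, "0799".toList]),
   ("airtel", ["0730".toList, "0731".toList, "0732".toList, "0733".toList, "0734".toList, "0735".toList, "0736".toList, "0737".toList, "0738".toList, "0739".toList, "0750".toList, "0751".toList, "0752".toList, "0753".toList, "0754".toList, "0755".toList, "0756".toList, "0757".toList, "0758".toList, "0759".toList, "0740".toList, "0741".toList, "0742".toList, "0743".toList, "0744".toList, "0745".toList, "0746".toList, "0747".toList]),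
   ("telkom", ["0760".toList, "0761".toList, "0762".toList, "0763".toList, "0764".toList, "0765".toList, "0766".toList, "0767".toList, "0768".toList, "0769".toList, "0770".toList, "0771".toList, "0772".toList, "0773".toList, "0774".toList, "0775".toList, "0776".toList, "0777".toList, "0778".toList, "0779".toList]),
   ("equitel", ["0748".toList, "0749".toList])]

-- 'for carrier, prefixes in carriers.items(): if prefix in prefixes: return carrier'
def pvLoopA (pre : List Char) : List (String × List (List Char)) → Option String
  | [] => none
  | (carrier, prefixes) :: rest =>
      if pre ∈ prefixes then some carrier else pvLoopA pre rest

def detect_phone_carrier_py (phone : String) : Option String :=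
  if phone = "" then none
  else
    let digits := phone.toList.filter PySem.Chars.isdigit
    if digits.length ≥ 10 then
      let pre := PySem.List.slice digits (some (-10)) (some (-6))
      match pvLoopA pre pvCarriers with
      | some carrier => some carrier
      | none => some "unknown"
    else some "unknown"

-- ===== PORT B =====
def pvClassifyB (n : Nat) : String :=
  if (1 ≤ n ∧ n ≤ 4) ∨ (10 ≤ n ∧ n ≤ 29) ∨ (90 ≤ n ∧ n ≤ 99) then "safaricom"
  else if (30 ≤ n ∧ n ≤ 47) ∨ (50 ≤ n ∧ n ≤ 59) then "airtel"
  else if 48 ≤ n ∧ n ≤ 49 then "equitel"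
  else if 60 ≤ n ∧ n ≤ 79 then "telkom"
  else "unknown"

def detect_phone_carrier_py_alt (phone : String) : Option String :=
  if phone = "" then none
  else
    let digits := phone.toList.filter PySem.Chars.isdigit
    if digits.length < 10 then some "unknown"
    else
      match PySem.List.slice digits (some (-10)) (some (-6)) with
      -- 'a, b, c, d = digits[-10:-6]': the slice always has length 4 here, the catch-all is unreachable
      | [a, b, c, d] =>
          if a ≠ '0' ∨ b ≠ '7' then some "unknown"
          else some (pvClassifyB ((c.toNat - 48) * 10 + (d.toNat - 48)))
      | _ => some "unknown"

-- ===== PRECONDITION & SPEC =====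
def Spec_detect_phone_carrier_py (phone : String) (out : Option String) : Prop := out = detect_phone_carrier_py_alt phone
instance (phone : String) (out : Option String) : Decidable (Spec_detect_phone_carrier_py phone out) := by unfold Spec_detect_phone_carrier_py; infer_instance

-- ===== CLAIM (what is proved, stated in full; the proofs are below) =====
def Claim_equal_detect_phone_carrier_py : Prop := ∀ (phone : String), Dom_detect_phone_carrier_py phone → Spec_detect_phone_carrier_py phone (detect_phone_carrier_py phone)

-- ===== LEMMAS AND PROOFS =====

def pvDigits : List Char := "0123456789".toList

def pvDig (i : Fin 10) : Char := pvDigits.get (Fin.cast (by decide) i)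

theorem pv_isdigit_mem {c : Char} (h : PySem.Chars.isdigit c = true) : c ∈ pvDigits := by
  simp [PySem.Chars.isdigit] at h
  obtain ⟨h1, h2⟩ := h
  have hl : 48 ≤ c.toNat := h1
  have hr : c.toNat ≤ 57 := h2
  have hc : Char.ofNat c.toNat = c := Char.ofNat_toNat c
  set n := c.toNat with hn
  interval_cases n <;> (rw [← hc]; decide)

theorem pv_mem_dig {c : Char} (h : c ∈ pvDigits) : ∃ i : Fin 10, pvDig i = c := by
  obtain ⟨⟨n, hlt⟩, rfl⟩ := List.mem_iff_get.mp h
  exact ⟨⟨n, by simpa using hlt⟩, rfl⟩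

-- every prefix in the table starts with '0','7'
theorem pv_table07 : ∀ r ∈ pvCarriers, ∀ q ∈ r.2, q.take 2 = ['0', '7'] := by decide

theorem pvLoopA_none (pre : List Char) (rows : List (String × List (List Char)))
    (h : ∀ r ∈ rows, ∀ q ∈ r.2, q.take 2 = ['0', '7'])
    (hpre : pre.take 2 ≠ ['0', '7']) : pvLoopA pre rows = none := by
  induction rows with
  | nil => rfl
  | cons r rest ih =>
      obtain ⟨carrier, prefixes⟩ := r
      simp only [pvLoopA]
      rw [if_neg, ih]
      · intro r hr q hq; exact h r (List.mem_cons_of_mem _ hr) q hq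
      · intro hmem
        exact hpre (h _ (List.mem_cons_self) _ hmem)

-- the table lookup agrees with the interval classification on every '07'-prefixed digit pair
theorem pv_core_fin : ∀ (k l : Fin 10),
    (match pvLoopA ['0', '7', pvDig k, pvDig l] pvCarriers with
      | some carrier => some carrier
      | none => some "unknown")
    = some (pvClassifyB (((pvDig k).toNat - 48) * 10 + ((pvDig l).toNat - 48))) := by
  decide

theorem pv_core {a b c d : Char} (ha : a ∈ pvDigits) (hb : b ∈ pvDigits)
    (hc : c ∈ pvDigits) (hd : d ∈ pvDigits) :
    (match pvLoopA [a, b, c, d] pvCarriers with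
      | some carrier => some carrier
      | none => some "unknown")
    = (if a ≠ '0' ∨ b ≠ '7' then some "unknown"
       else some (pvClassifyB ((c.toNat - 48) * 10 + (d.toNat - 48)))) := by
  by_cases h07 : a = '0' ∧ b = '7'
  · obtain ⟨rfl, rfl⟩ := h07
    obtain ⟨k, rfl⟩ := pv_mem_dig hc
    obtain ⟨l, rfl⟩ := pv_mem_dig hd
    rw [pv_core_fin k l]
    simp
  · have hne : List.take 2 [a, b, c, d] ≠ ['0', '7'] := by
      simp only [List.take]
      intro he
      exact h07 ⟨by injection he, by injection he with _ he2; injection he2⟩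
    rw [pvLoopA_none _ _ pv_table07 hne, if_pos]
    tauto

-- the slice digits[-10:-6] of a ≥10-long digit list is 4 digit chars
theorem pv_slice_len {digits : List Char} (h : 10 ≤ digits.length) :
    (PySem.List.slice digits (some (-10)) (some (-6))).length = 4 := by
  rw [PySem.List.length_slice digits (-10) (-6),
    PySem.List.clampIdx_neg_ofNat digits.length 10 (by omega),
    PySem.List.clampIdx_neg_ofNat digits.length 6 (by omega)]
  omega

-- ===== VERDICT (by name: the statement is the Claim_ definition above) =====
theorem detect_phone_carrier_py_spec : Claim_equal_detect_phone_carrier_py := by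
  intro phone _
  unfold Spec_detect_phone_carrier_py detect_phone_carrier_py detect_phone_carrier_py_alt
  by_cases hemp : phone = ""
  · simp [hemp]
  · rw [if_neg hemp, if_neg hemp]
    set digits := phone.toList.filter PySem.Chars.isdigit with hdig
    by_cases hlen : 10 ≤ digits.length
    · rw [if_pos hlen, if_neg (by omega)]
      have h4 : (PySem.List.slice digits (some (-10)) (some (-6))).length = 4 := pv_slice_len hlen
      have hmemd : ∀ x ∈ PySem.List.slice digits (some (-10)) (some (-6)), x ∈ pvDigits := by
        intro x hx
        have := PySem.List.mem_of_mem_slice digits (some (-10)) (some (-6)) hx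
        rw [hdig] at this
        exact pv_isdigit_mem (List.mem_filter.mp this).2
      match hs : PySem.List.slice digits (some (-10)) (some (-6)), h4 with
      | [a, b, c, d], _ =>
        rw [hs] at hmemd
        exact pv_core (hmemd a (by simp)) (hmemd b (by simp)) (hmemd c (by simp)) (hmemd d (by simp))
    · rw [if_neg (by omega), if_pos (by omega)]
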